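-- pv_equiv track=rewrite | github.com/mikefeneley/topcoder | src/SRM-187/office_parking.py | spacesUsed
-- ===== SOURCE A (Python) =====
-- def spacesUsed(events):
--     spots = 0
--     current = 0
--
--     for event in events:
--         div = event.split()
--
--         if 'arrives' in div[1]:
--             current += 1
--             if(current > spots):
--                 spots = current
--         elif 'departs' in div[1]:
--             current -= 1
--
--     return spots
-- ===== SOURCE B (Python) =====
-- def spacesUsed(events):
--     # Divide and conquer: solve(evs) returns (peak, total) where total is the net
--     # +1/-1 sum of evs and peak is the maximum (>= 0) prefix sum; halves combine
--     # by (peak, total) = (max(p1, t1 + p2), t1 + t2).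
--     def solve(evs):
--         if not evs:
--             return (0, 0)
--         if len(evs) == 1:
--             w = evs[0].split()[1]
--             d = 1 if 'arrives' in w else (-1 if 'departs' in w else 0)
--             return (max(0, d), d)
--         mid = len(evs) // 2
--         p1, t1 = solve(evs[:mid])
--         p2, t2 = solve(evs[mid:])
--         return (max(p1, t1 + p2), t1 + t2)
--     return solve(events)[0]
-- ===== Notes on version B (the rewrite author's own statement) =====
-- stated objective: alternative
-- what changed: A tracks spots/current with one sequential loop over the events; B recursively splits the event list in half, computes a (peak, net-total) pair for each half, and combines halves with the associative rule (max(p1, t1+p2), t1+t2).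
import Mathlib
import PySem

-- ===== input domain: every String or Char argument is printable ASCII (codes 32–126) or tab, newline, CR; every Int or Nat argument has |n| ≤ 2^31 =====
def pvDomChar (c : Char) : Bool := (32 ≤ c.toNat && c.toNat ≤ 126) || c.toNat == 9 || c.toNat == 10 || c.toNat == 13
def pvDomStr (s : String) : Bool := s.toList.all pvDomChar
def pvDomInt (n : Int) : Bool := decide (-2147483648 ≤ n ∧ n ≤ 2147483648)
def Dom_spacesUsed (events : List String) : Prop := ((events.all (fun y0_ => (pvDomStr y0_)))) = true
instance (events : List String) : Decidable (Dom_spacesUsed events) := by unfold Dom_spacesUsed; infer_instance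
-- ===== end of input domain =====

-- B replaces A's single sequential tracking loop by a divide-and-conquer that combines (peak, total) pairs of halves (alternative decomposition, same cost).


-- ===== PORT A =====
-- one loop over events, updating (spots, current); div[1] is pyGet? (none = IndexError, excluded by Pre_)
def spacesUsedStep (st : Int × Int) (event : String) : Int × Int :=
  match PySem.List.pyGet? (PySem.Str.split₀ event) 1 with
  | none => st
  | some w =>
    if PySem.Str.isIn "arrives" w then
      let current := st.2 + 1
      (if current > st.1 then current else st.1, current)
    else if PySem.Str.isIn "departs" w then (st.1, st.2 - 1)
    else st

def spacesUsed (events : List String) : Int :=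
  (events.foldl spacesUsedStep (0, 0)).1

-- ===== PORT B =====
-- divide and conquer: (peak, total) of a half-list; halves combine by (max p1 (t1+p2), t1+t2)
def pvSolve (evs : List String) : Int × Int :=
  match evs with
  | [] => (0, 0)
  | [e] =>
    let d : Int :=
      match PySem.List.pyGet? (PySem.Str.split₀ e) 1 with
      | none => 0  -- Python raises IndexError here; excluded by Pre_
      | some w =>
        if PySem.Str.isIn "arrives" w then 1
        else if PySem.Str.isIn "departs" w then -1
        else 0
    (max 0 d, d)
  | e1 :: e2 :: rest =>
    let evs' := e1 :: e2 :: rest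
    let mid := evs'.length / 2
    let l := pvSolve (evs'.take mid)
    let r := pvSolve (evs'.drop mid)
    (max l.1 (l.2 + r.1), l.2 + r.2)
termination_by evs.length
decreasing_by
  · simp only [List.length_take, List.length_cons]; omega
  · simp only [List.length_drop, List.length_cons]; omega

def spacesUsed_alt (events : List String) : Int :=
  (pvSolve events).1

-- ===== PRECONDITION & SPEC =====
-- Pre_ excludes exactly the inputs where Python A raises IndexError: an event splitting into fewer than two words.
def Pre_spacesUsed (events : List String) : Prop :=
  ∀ e ∈ events, 2 ≤ (PySem.Str.split₀ e).length
instance (events : List String) : Decidable (Pre_spacesUsed events) := by unfold Pre_spacesUsed; infer_instance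
def pvWitness_spacesUsed : List String := ["car A arrives", "car A departs"]

def Spec_spacesUsed (events : List String) (out : Int) : Prop := out = spacesUsed_alt events
instance (events : List String) (out : Int) : Decidable (Spec_spacesUsed events out) := by unfold Spec_spacesUsed; infer_instance

-- ===== CLAIM (what is proved, stated in full; the proofs are below) =====
def Claim_equal_spacesUsed : Prop := ∀ (events : List String), Dom_spacesUsed events → Pre_spacesUsed events → Spec_spacesUsed events (spacesUsed events)

-- ===== LEMMAS AND PROOFS =====

-- unfolding equations for pvSolve
theorem pvSolve_single (e : String) : (pvSolve [e]).1 = max 0 (pvSolve [e]).2 := by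
  simp [pvSolve]

theorem pvSolve_cons2 (e1 e2 : String) (rest : List String) :
    pvSolve (e1 :: e2 :: rest) =
      (max (pvSolve ((e1 :: e2 :: rest).take ((e1 :: e2 :: rest).length / 2))).1
         ((pvSolve ((e1 :: e2 :: rest).take ((e1 :: e2 :: rest).length / 2))).2 +
          (pvSolve ((e1 :: e2 :: rest).drop ((e1 :: e2 :: rest).length / 2))).1),
       (pvSolve ((e1 :: e2 :: rest).take ((e1 :: e2 :: rest).length / 2))).2 +
       (pvSolve ((e1 :: e2 :: rest).drop ((e1 :: e2 :: rest).length / 2))).2) := by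
  rw [pvSolve]

-- total ≤ peak and 0 ≤ peak for every pvSolve result
theorem pvSolve_bounds_aux (n : Nat) :
    ∀ (evs : List String), evs.length ≤ n →
      (pvSolve evs).2 ≤ (pvSolve evs).1 ∧ 0 ≤ (pvSolve evs).1 := by
  induction n with
  | zero =>
    intro evs hlen
    have : evs = [] := List.eq_nil_of_length_eq_zero (Nat.le_zero.mp hlen)
    subst this; simp [pvSolve]
  | succ n ih =>
    intro evs hlen
    match evs with
    | [] => simp [pvSolve]
    | [e] => have h1 := pvSolve_single e; omega
    | e1 :: e2 :: rest =>
      rw [pvSolve_cons2]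
      have hl := ih ((e1 :: e2 :: rest).take ((e1 :: e2 :: rest).length / 2))
        (by simp at hlen ⊢; omega)
      have hr := ih ((e1 :: e2 :: rest).drop ((e1 :: e2 :: rest).length / 2))
        (by simp at hlen ⊢; omega)
      simp only
      omega

theorem pvSolve_bounds (evs : List String) :
    (pvSolve evs).2 ≤ (pvSolve evs).1 ∧ 0 ≤ (pvSolve evs).1 :=
  pvSolve_bounds_aux evs.length evs le_rfl

-- the delta a single event contributes in A's step, as computed by pvSolve on [e]
theorem step_eq (s c : Int) (h : c ≤ s) (e : String) :
    spacesUsedStep (s, c) e = (max s (c + (pvSolve [e]).2), c + (pvSolve [e]).2) := by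
  unfold spacesUsedStep pvSolve
  cases PySem.List.pyGet? (PySem.Str.split₀ e) 1 with
  | none => simp; omega
  | some w =>
    by_cases h1 : PySem.Str.isIn "arrives" w
    · simp only [if_pos h1, Prod.mk.injEq]
      constructor <;> first | trivial | (split_ifs <;> omega)
    · by_cases h2 : PySem.Str.isIn "departs" w
      · simp only [if_neg h1, if_pos h2, Prod.mk.injEq]
        constructor <;> first | trivial | omega
      · simp only [if_neg h1, if_neg h2, Prod.mk.injEq]
        constructor <;> first | trivial | omega

-- A's fold from any state with c ≤ s is determined by pvSolve of the suffix
theorem fold_eq_solve (n : Nat) :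
    ∀ (evs : List String), evs.length ≤ n → ∀ (s c : Int), c ≤ s →
      evs.foldl spacesUsedStep (s, c) = (max s (c + (pvSolve evs).1), c + (pvSolve evs).2) := by
  induction n with
  | zero =>
    intro evs hlen s c h
    have : evs = [] := List.eq_nil_of_length_eq_zero (Nat.le_zero.mp hlen)
    subst this; simp [pvSolve]; omega
  | succ n ih =>
    intro evs hlen s c h
    match evs with
    | [] => simp [pvSolve]; omega
    | [e] =>
      simp only [List.foldl_cons, List.foldl_nil]
      rw [step_eq s c h e]
      have h1 := pvSolve_single e
      simp only [Prod.mk.injEq]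
      refine ⟨?_, trivial⟩
      rw [h1]
      omega
    | e1 :: e2 :: rest =>
      set evs' := e1 :: e2 :: rest with hevs'
      set mid := evs'.length / 2 with hmid
      have hlen' : evs'.length = rest.length + 2 := by simp [hevs']
      have htl : (evs'.take mid).length ≤ n := by
        simp only [List.length_take]; omega
      have hdl : (evs'.drop mid).length ≤ n := by
        simp only [List.length_drop]; omega
      have hb := pvSolve_bounds (evs'.take mid)
      calc evs'.foldl spacesUsedStep (s, c)
          = (evs'.take mid ++ evs'.drop mid).foldl spacesUsedStep (s, c) := by
              rw [List.take_append_drop]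
        _ = (evs'.drop mid).foldl spacesUsedStep ((evs'.take mid).foldl spacesUsedStep (s, c)) := by
              rw [List.foldl_append]
        _ = (evs'.drop mid).foldl spacesUsedStep
              (max s (c + (pvSolve (evs'.take mid)).1), c + (pvSolve (evs'.take mid)).2) := by
              rw [ih _ htl s c h]
        _ = (max s (c + (pvSolve evs').1), c + (pvSolve evs').2) := by
              rw [ih _ hdl _ _ (by omega)]
              rw [hevs', pvSolve_cons2, ← hevs', ← hmid]
              simp only [Prod.mk.injEq]
              constructor <;> omega

-- ===== VERDICT (by name: the statement is the Claim_ definition above) =====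
theorem spacesUsed_spec : Claim_equal_spacesUsed := by
  intro events _ _
  unfold Spec_spacesUsed spacesUsed spacesUsed_alt
  rw [fold_eq_solve events.length events le_rfl 0 0 le_rfl]
  have := pvSolve_bounds events
  simp only [zero_add]
  omega
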